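-- pv_equiv track=rewrite | github.com/Crusazer/tms-lessons | homework_18/utilits.py | get_main_page_string
-- ===== SOURCE A (Python) =====
-- def get_main_page_string(data: list) -> str:
--     string = '<ul>'
--     category = ''
--     fist_step_flag = True
--
--     for product in data:
--         if category != product[4]:  # 4 is product.name in tuple
--             category = product[4]
--
--             if fist_step_flag:
--                 fist_step_flag = False
--             else:
--                 string += f'</ul></li>'
--             # 3 is category_id
--             string += f'''\n<br><li><a href="http://127.0.0.1:8080/category/{product[3]}">{category}<a><ul>'''
--             string += f"\n<li>{product[1]}</li>"  # 1 is product.name in tuple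
--         else:
--             string += f"\n<li>{product[1]}</li>"
--     string += '</ul>'
--     return string
-- ===== SOURCE B (Python) =====
-- def get_main_page_string(data: list) -> str:
--     # Peels the list run by run (consecutive products of equal category) instead of
--     # keeping a sentinel/flag state; every run - including a leading empty-named
--     # category - gets its header.
--     out = '<ul>'
--     rest = data
--     while rest:
--         p = rest[0]
--         i = 1
--         while i < len(rest) and rest[i][4] == p[4]:
--             i += 1
--         out += (f'\n<br><li><a href="http://127.0.0.1:8080/category/{p[3]}">{p[4]}<a><ul>'
--                 + ''.join(f'\n<li>{q[1]}</li>' for q in rest[:i]))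
--         rest = rest[i:]
--         if rest:
--             out += '</ul></li>'
--     return out + '</ul>'
-- ===== Notes on version B (the rewrite author's own statement) =====
-- stated objective: alternative
-- what changed: Replaces A's single fold carrying a (string, current-category, first-flag) sentinel state with a run-peeling loop: take the leading run of equal categories, emit its header and items, append the '</ul></li>' separator between runs, repeat on the tail.
-- intended difference: On inputs whose first product has category '' A's sentinel category='' never fires, so the leading run is emitted as bare <li> items with no category header; B emits the header for it like for every other category, the intended uniform treatment. — e.g. on get_main_page_string([("1", "Milk", "x", "7", "")]): A returns "<ul>\n<li>Milk</li></ul>", B returns "<ul>\n<br><li><a href=\"http://127.0.0.1:8080/category/7\"><a><ul>\n<li>Milk</li></ul>"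
import Mathlib
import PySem

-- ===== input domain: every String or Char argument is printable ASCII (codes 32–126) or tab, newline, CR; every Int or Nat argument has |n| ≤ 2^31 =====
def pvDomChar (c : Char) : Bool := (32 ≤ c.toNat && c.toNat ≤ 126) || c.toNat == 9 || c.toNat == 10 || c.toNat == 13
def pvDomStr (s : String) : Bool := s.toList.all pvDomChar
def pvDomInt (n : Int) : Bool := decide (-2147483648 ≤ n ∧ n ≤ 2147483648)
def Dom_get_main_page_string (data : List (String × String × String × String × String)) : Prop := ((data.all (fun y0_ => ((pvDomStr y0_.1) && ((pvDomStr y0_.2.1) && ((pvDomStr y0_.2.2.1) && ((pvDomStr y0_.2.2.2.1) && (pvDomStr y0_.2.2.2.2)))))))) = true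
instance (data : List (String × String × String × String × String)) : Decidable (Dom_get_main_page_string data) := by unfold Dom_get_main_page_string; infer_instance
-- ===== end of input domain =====

-- B rewrites A's sentinel/flag accumulator loop as a run-peeling loop (take the leading
-- run of equal categories, emit its header and items, repeat); objective: alternative
-- decomposition, same cost. On a leading empty-named category A's '' sentinel suppresses
-- the header (see D_ below); B treats it like any category.

-- ===== PORT A =====
-- the loop body of A's for-loop: state (string, category, fist_step_flag)
def pvAStep (st : String × String × Bool) (product : String × String × String × String × String) :
    String × String × Bool :=
  if st.2.1 ≠ product.2.2.2.2 then
    ((if st.2.2 then st.1 else st.1 ++ "</ul></li>") ++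
      ("\n<br><li><a href=\"http://127.0.0.1:8080/category/" ++ product.2.2.2.1 ++ "\">" ++
        product.2.2.2.2 ++ "<a><ul>") ++
      ("\n<li>" ++ product.2.1 ++ "</li>"),
     product.2.2.2.2, false)
  else
    (st.1 ++ ("\n<li>" ++ product.2.1 ++ "</li>"), st.2.1, st.2.2)

def get_main_page_string (data : List (String × String × String × String × String)) : String :=
  (data.foldl pvAStep ("<ul>", "", true)).1 ++ "</ul>"

-- ===== PORT B =====
def pvAltItem (q : String × String × String × String × String) : String :=
  "\n<li>" ++ q.2.1 ++ "</li>"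

def pvAltHeader (p : String × String × String × String × String) : String :=
  "\n<br><li><a href=\"http://127.0.0.1:8080/category/" ++ p.2.2.2.1 ++ "\">" ++
    p.2.2.2.2 ++ "<a><ul>"

-- one iteration of Source B's outer while loop: leading run (rest[:i]) then the tail (rest[i:])
def pvAltRender : List (String × String × String × String × String) → String
  | [] => ""
  | p :: ps =>
    let run := ps.takeWhile (fun q => q.2.2.2.2 == p.2.2.2.2)
    let rest := ps.dropWhile (fun q => q.2.2.2.2 == p.2.2.2.2)
    pvAltHeader p ++ String.join ((p :: run).map pvAltItem) ++
      (if rest.isEmpty then "" else "</ul></li>" ++ pvAltRender rest)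
termination_by l => l.length
decreasing_by
  simp only [List.length_cons]
  exact Nat.lt_succ_of_le (List.length_dropWhile_le _ _)

def get_main_page_string_alt (data : List (String × String × String × String × String)) : String :=
  "<ul>" ++ pvAltRender data ++ "</ul>"

-- ===== PRECONDITION & SPEC =====
-- On inputs whose first product has category '' A's sentinel category='' never fires, so the
-- leading run is emitted as bare <li> items with no category header; B emits the header for
-- it like for every other category, the intended uniform treatment.
def D_get_main_page_string (data : List (String × String × String × String × String)) : Prop :=
  data.head?.any (fun p => p.2.2.2.2 == "") = true

instance (data : List (String × String × String × String × String)) : Decidable (D_get_main_page_string data) := by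
  unfold D_get_main_page_string; infer_instance

def Spec_get_main_page_string (data : List (String × String × String × String × String)) (out : String) : Prop :=
  ¬ D_get_main_page_string data → out = get_main_page_string_alt data
instance (data : List (String × String × String × String × String)) (out : String) : Decidable (Spec_get_main_page_string data out) := by unfold Spec_get_main_page_string; infer_instance

def pvDiffWitness_get_main_page_string : (List (String × String × String × String × String)) :=
  [("1", "Milk", "x", "7", "")]

def pvDiffWitnessOut_get_main_page_string : String × String :=
  ("<ul>\n<li>Milk</li></ul>",
   "<ul>\n<br><li><a href=\"http://127.0.0.1:8080/category/7\"><a><ul>\n<li>Milk</li></ul>")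

-- ===== CLAIM (what is proved, stated in full; the proofs are below) =====
def Claim_unchanged_get_main_page_string : Prop := ∀ (data : List (String × String × String × String × String)), Dom_get_main_page_string data → Spec_get_main_page_string data (get_main_page_string data)

def Claim_changed_get_main_page_string : Prop := Dom_get_main_page_string (pvDiffWitness_get_main_page_string) ∧ D_get_main_page_string (pvDiffWitness_get_main_page_string) ∧ get_main_page_string (pvDiffWitness_get_main_page_string) = pvDiffWitnessOut_get_main_page_string.1 ∧ get_main_page_string_alt (pvDiffWitness_get_main_page_string) = pvDiffWitnessOut_get_main_page_string.2 ∧ pvDiffWitnessOut_get_main_page_string.1 ≠ pvDiffWitnessOut_get_main_page_string.2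

-- ===== LEMMAS AND PROOFS =====
theorem pv_foldl_append (l : List String) : ∀ s : String, l.foldl (· ++ ·) s = s ++ l.foldl (· ++ ·) "" := by
  induction l with
  | nil => intro s; simp
  | cons a t ih => intro s; simp only [List.foldl_cons]; rw [ih (s ++ a), ih ("" ++ a)]; simp [String.append_assoc]

theorem pv_join_cons (a : String) (l : List String) :
    String.join (a :: l) = a ++ String.join l := by
  simp only [String.join, List.foldl_cons]
  rw [pv_foldl_append]
  simp

-- A's loop over a run of products whose category equals the current one only appends items
theorem pv_run_lemma (run : List (String × String × String × String × String)) :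
    ∀ (c s : String) (f : Bool), (∀ q ∈ run, q.2.2.2.2 = c) →
    List.foldl pvAStep (s, c, f) run = (s ++ String.join (run.map pvAltItem), c, f) := by
  induction run with
  | nil => intro c s f _; simp [String.join]
  | cons q t ih =>
    intro c s f h
    have hq : q.2.2.2.2 = c := h q (by simp)
    simp only [List.foldl_cons]
    have hstep : pvAStep (s, c, f) q = (s ++ pvAltItem q, c, f) := by
      simp [pvAStep, pvAltItem, hq]
    rw [hstep, ih c _ f (fun x hx => h x (by simp [hx]))]
    simp [pv_join_cons, String.append_assoc]

theorem pv_dropWhile_head {α : Type} (p : α → Bool) :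
    ∀ (l : List α) (x : α) (xs : List α), l.dropWhile p = x :: xs → p x = false := by
  intro l
  induction l with
  | nil => intro x xs h; simp [List.dropWhile] at h
  | cons a t ih =>
    intro x xs h
    by_cases hp : p a = true
    · rw [List.dropWhile_cons_of_pos hp] at h; exact ih x xs h
    · rw [List.dropWhile_cons_of_neg hp] at h
      cases h; simpa using hp

-- main lemma: from any state whose category differs from the head's, A's fold renders runs
theorem pv_main_lemma (n : Nat) :
    ∀ (data : List (String × String × String × String × String)), data.length ≤ n →
    ∀ (c s : String) (f : Bool),
      (∀ p ∈ data.head?, p.2.2.2.2 ≠ c) → data ≠ [] →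
      (List.foldl pvAStep (s, c, f) data).1 =
        s ++ (if f then "" else "</ul></li>") ++ pvAltRender data := by
  induction n with
  | zero =>
    intro data hlen c s f _ hne
    cases data with
    | nil => exact absurd rfl hne
    | cons p ps => simp at hlen
  | succ n ih =>
    intro data hlen c s f hhead hne
    cases data with
    | nil => exact absurd rfl hne
    | cons p ps =>
      have hcne : p.2.2.2.2 ≠ c := by simpa using hhead
      have hsplit : ps.takeWhile (fun q => q.2.2.2.2 == p.2.2.2.2) ++
          ps.dropWhile (fun q => q.2.2.2.2 == p.2.2.2.2) = ps :=
        List.takeWhile_append_dropWhile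
      have hstep : pvAStep (s, c, f) p =
          ((if f then s else s ++ "</ul></li>") ++
            ("\n<br><li><a href=\"http://127.0.0.1:8080/category/" ++ p.2.2.2.1 ++ "\">" ++
              p.2.2.2.2 ++ "<a><ul>") ++
            ("\n<li>" ++ p.2.1 ++ "</li>"), p.2.2.2.2, false) := by
        simp [pvAStep, Ne.symm hcne]
      have hruncat : ∀ q ∈ ps.takeWhile (fun q => q.2.2.2.2 == p.2.2.2.2), q.2.2.2.2 = p.2.2.2.2 := by
        intro q hq
        have := List.mem_takeWhile_imp hq
        simpa using this
      conv_lhs => rw [List.foldl_cons, hstep, ← hsplit, List.foldl_append,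
        pv_run_lemma _ _ _ _ hruncat]
      cases hrest : ps.dropWhile (fun q => q.2.2.2.2 == p.2.2.2.2) with
      | nil =>
        rw [pvAltRender]
        simp only [hrest, List.foldl_nil, List.isEmpty_nil, if_true]
        cases f <;> simp [pvAltHeader, pvAltItem, pv_join_cons, String.append_assoc]
      | cons r rs =>
        have hr : r.2.2.2.2 ≠ p.2.2.2.2 := by
          have := pv_dropWhile_head _ ps r rs hrest
          simpa using this
        have hlen2 : (r :: rs).length ≤ n := by
          have h1 : (ps.dropWhile (fun q => q.2.2.2.2 == p.2.2.2.2)).length ≤ ps.length :=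
            List.length_dropWhile_le _ _
          rw [hrest] at h1
          exact Nat.le_trans h1 (by simpa using Nat.le_of_succ_le_succ hlen)
        rw [ih (r :: rs) hlen2 p.2.2.2.2 _ false (by simpa using hr) (by simp)]
        conv_rhs => rw [pvAltRender]
        cases f <;> simp [hrest, pvAltHeader, pvAltItem, pv_join_cons, String.append_assoc]

-- ===== VERDICT (by name: the statement is the Claim_ definition above) =====
theorem get_main_page_string_spec : Claim_unchanged_get_main_page_string := by
  intro data _ hD
  cases data with
  | nil =>
    rw [get_main_page_string_alt, pvAltRender]
    decide
  | cons p ps =>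
    have hcat : p.2.2.2.2 ≠ "" := by
      intro h
      exact hD (by simp [D_get_main_page_string, h])
    have hm := pv_main_lemma (p :: ps).length (p :: ps) (Nat.le_refl _) "" "<ul>" true
      (by simpa using hcat) (by simp)
    simp only [if_true] at hm
    rw [get_main_page_string, get_main_page_string_alt, hm]
    simp

theorem get_main_page_string_changed : Claim_changed_get_main_page_string := by
  unfold Claim_changed_get_main_page_string
  refine ⟨by decide, by decide, by decide, ?_, by decide⟩
  rw [get_main_page_string_alt, pvDiffWitness_get_main_page_string, pvAltRender]
  simp [pvAltHeader, pvAltItem, pvDiffWitnessOut_get_main_page_string, String.join]
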